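-- pv_equiv track=rewrite | github.com/chiesa1014/code | segment_recognaize.py | find_intervals
-- ===== SOURCE A (Python) =====
-- def find_intervals(highlight, value):
--     intervals = []
--     start = None
--     for i in range(len(highlight)):
--         if highlight[i] == value and start is None:
--             start = i
--         elif highlight[i] != value and start is not None:
--             intervals.append((start, i-1))
--             start = None
--     if start is not None:
--         intervals.append((start, len(highlight)-1))
--     return intervals
-- ===== SOURCE B (Python) =====
-- def find_intervals(highlight, value):
--     intervals = []
--     i = 0
--     n = len(highlight)
--     while i < n:
--         if highlight[i] == value:
--             j = i
--             while j + 1 < n and highlight[j + 1] == value: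
--                 j += 1
--             intervals.append((i, j))
--             i = j + 1
--         else:
--             i += 1
--     return intervals
-- ===== Notes on version B (the rewrite author's own statement) =====
-- stated objective: alternative
-- what changed: Replaced the start-sentinel transition state machine with a run-scan: an inner scan finds the end of each maximal run of value and the whole interval is emitted at once, so no Optional start state or end-of-loop flush is maintained.
import Mathlib
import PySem

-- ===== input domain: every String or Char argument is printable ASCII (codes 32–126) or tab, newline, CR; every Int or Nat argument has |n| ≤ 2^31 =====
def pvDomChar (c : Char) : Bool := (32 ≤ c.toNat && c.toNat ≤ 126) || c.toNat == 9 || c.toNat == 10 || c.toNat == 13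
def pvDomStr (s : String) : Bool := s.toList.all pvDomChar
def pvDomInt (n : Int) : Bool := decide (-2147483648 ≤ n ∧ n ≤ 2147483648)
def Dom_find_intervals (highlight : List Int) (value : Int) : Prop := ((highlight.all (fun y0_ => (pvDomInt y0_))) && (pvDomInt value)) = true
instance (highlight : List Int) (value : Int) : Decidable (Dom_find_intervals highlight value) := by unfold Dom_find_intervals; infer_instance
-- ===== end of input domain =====

-- B replaces A's start-sentinel state machine by a run-scan (same O(n) cost, different decomposition).

-- ===== PORT A =====
-- literal port of A: fold over range(len(highlight)) carrying (intervals, start), then flush start.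
def find_intervals (highlight : List Int) (value : Int) : List (Int × Int) :=
  let n : Int := PySem.List.len highlight
  let st := (PySem.List.pyRange 0 n 1).foldl
    (fun (acc : List (Int × Int) × Option Int) i =>
      let h := PySem.List.pyGetD highlight i 0   -- i is always in range, so pyGetD is exact here
      match acc.2 with
      | none => if h = value then (acc.1, some i) else acc
      | some s => if h ≠ value then (acc.1 ++ [(s, i - 1)], none) else acc)
    ([], none)
  match st.2 with
  | some s => st.1 ++ [(s, n - 1)]
  | none => st.1

-- ===== PORT B =====
-- B's inner while loop: length of the maximal prefix run equal to v
def runLen (v : Int) : List Int → Nat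
  | [] => 0
  | x :: rest => if x = v then runLen v rest + 1 else 0

-- B's outer while loop: at a match, scan the whole run and emit it at once
def altGo (v : Int) : Int → List Int → List (Int × Int)
  | _, [] => []
  | i, x :: rest =>
    if x = v then
      let k := runLen v rest
      (i, i + (k : Int)) :: altGo v (i + (k : Int) + 1) (rest.drop k)
    else
      altGo v (i + 1) rest
termination_by _ xs => xs.length
decreasing_by
  · simp only [List.length_drop, List.length_cons]; omega
  · simp

def find_intervals_alt (highlight : List Int) (value : Int) : List (Int × Int) :=
  altGo value 0 highlight

-- ===== PRECONDITION & SPEC =====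
def Spec_find_intervals (highlight : List Int) (value : Int) (out : List (Int × Int)) : Prop := out = find_intervals_alt highlight value
instance (highlight : List Int) (value : Int) (out : List (Int × Int)) : Decidable (Spec_find_intervals highlight value out) := by unfold Spec_find_intervals; infer_instance

-- ===== CLAIM (what is proved, stated in full; the proofs are below) =====
def Claim_equal_find_intervals : Prop := ∀ (highlight : List Int) (value : Int), Dom_find_intervals highlight value → Spec_find_intervals highlight value (find_intervals highlight value)

-- ===== LEMMAS AND PROOFS =====

-- A's loop body, on (index, element) pairs
def stepA (v : Int) (acc : List (Int × Int) × Option Int) (p : Int × Int) : List (Int × Int) × Option Int :=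
  match acc.2 with
  | none => if p.2 = v then (acc.1, some p.1) else acc
  | some s => if p.2 ≠ v then (acc.1 ++ [(s, p.1 - 1)], none) else acc

-- A's final flush, with `last` the last index of the list
def finishA (st : List (Int × Int) × Option Int) (last : Int) : List (Int × Int) :=
  match st.2 with
  | some s => st.1 ++ [(s, last)]
  | none => st.1

-- main invariant, mutually for the two loop states of A
theorem loop_inv (v : Int) (xs : List Int) :
    (∀ (i : Int) (acc : List (Int × Int)),
      finishA ((PySem.List.enumerate xs i).foldl (stepA v) (acc, none)) (i + xs.length - 1)
        = acc ++ altGo v i xs) ∧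
    (∀ (i s : Int) (acc : List (Int × Int)),
      finishA ((PySem.List.enumerate xs i).foldl (stepA v) (acc, some s)) (i + xs.length - 1)
        = acc ++ (s, i + (runLen v xs : Int) - 1) :: altGo v (i + (runLen v xs : Int)) (xs.drop (runLen v xs))) := by
  induction xs with
  | nil =>
    constructor
    · intro i acc; simp [PySem.List.enumerate, finishA, altGo]
    · intro i s acc; simp [PySem.List.enumerate, finishA, altGo, runLen]
  | cons x rest ih =>
    obtain ⟨ihN, ihS⟩ := ih
    constructor
    · intro i acc
      rw [PySem.List.enumerate_cons]
      by_cases hx : x = v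
      · subst hx
        simp only [List.foldl_cons, stepA, if_true]
        rw [altGo]
        simp only [if_true]
        rw [show (i + (↑(x :: rest).length : Int) - 1) = (i + 1) + (↑rest.length : Int) - 1 by
              simp only [List.length_cons]; push_cast; ring]
        rw [ihS (i + 1) i acc]
        have h1 : i + 1 + (runLen x rest : Int) - 1 = i + (runLen x rest : Int) := by ring
        have h2 : i + 1 + (runLen x rest : Int) = i + (runLen x rest : Int) + 1 := by ring
        rw [h1, h2]
      · simp only [List.foldl_cons, stepA, if_neg hx]
        rw [altGo]
        simp only [if_neg hx]
        rw [show (i + (↑(x :: rest).length : Int) - 1) = (i + 1) + (↑rest.length : Int) - 1 by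
              simp only [List.length_cons]; push_cast; ring]
        exact ihN (i + 1) acc
    · intro i s acc
      rw [PySem.List.enumerate_cons]
      by_cases hx : x = v
      · subst hx
        simp only [List.foldl_cons, stepA, ne_eq, not_true_eq_false, if_false]
        rw [show (i + (↑(x :: rest).length : Int) - 1) = (i + 1) + (↑rest.length : Int) - 1 by
              simp only [List.length_cons]; push_cast; ring]
        rw [ihS (i + 1) s acc]
        simp only [runLen, if_true, List.drop_succ_cons]
        push_cast
        have h1 : i + 1 + (runLen x rest : Int) - 1 = i + ((runLen x rest : Int) + 1) - 1 := by ring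
        have h2 : i + 1 + (runLen x rest : Int) = i + ((runLen x rest : Int) + 1) := by ring
        rw [h1, h2]
      · simp only [List.foldl_cons, stepA, ne_eq, hx, not_false_eq_true, if_true]
        rw [show (i + (↑(x :: rest).length : Int) - 1) = (i + 1) + (↑rest.length : Int) - 1 by
              simp only [List.length_cons]; push_cast; ring]
        rw [ihN (i + 1) (acc ++ [(s, i - 1)])]
        simp only [runLen, if_neg hx, Nat.cast_zero, add_zero, List.drop_zero]
        rw [altGo]
        simp [if_neg hx]

-- rewrite A's loop (over range + indexing) as a loop over enumerate
theorem portA_eq_enumerate (highlight : List Int) (value : Int) :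
    find_intervals highlight value
      = finishA ((PySem.List.enumerate highlight 0).foldl (stepA value) ([], none))
          ((highlight.length : Int) - 1) := by
  unfold find_intervals
  rw [PySem.List.enumerate_eq_map_pyRange (d := 0), List.foldl_map]
  rfl

-- ===== VERDICT (by name: the statement is the Claim_ definition above) =====
theorem find_intervals_spec : Claim_equal_find_intervals := by
  intro highlight value _
  unfold Spec_find_intervals find_intervals_alt
  rw [portA_eq_enumerate]
  have := (loop_inv value highlight).1 0 []
  simpa using this
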